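-- pv_equiv track=rewrite | github.com/jerryxfu/medive | modules/evaluator.py | sort_classes_by_frequency_keywords
-- ===== SOURCE A (Python) =====
-- from typing import Dict, List, Optional, Any
--
-- def sort_classes_by_frequency_keywords(unique_labels: List[int], class_names: List[str]) -> List[int]:
--     """
--     Sort class labels by common vs rare condition keywords.
--     """
--     common_conditions = ['cold', 'flu', 'headache', 'fever', 'cough', 'nausea', 'fatigue',
--                          'diarrhea', 'constipation', 'rash', 'back pain', 'arthritis',
--                          'hypertension', 'diabetes', 'asthma', 'depression', 'anxiety']
--
--     def is_common_condition(name: str) -> bool: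
--         name_lower = name.lower()
--         return any(common in name_lower for common in common_conditions)
--
--     # Separate common and rare conditions
--     common_pairs = []
--     rare_pairs = []
--
--     for label in unique_labels:
--         name = class_names[label]
--         if is_common_condition(name):
--             common_pairs.append((name.lower(), label))
--         else:
--             rare_pairs.append((name.lower(), label))
--
--     # Sort each group alphabetically
--     common_pairs.sort()
--     rare_pairs.sort()
--
--     # Return common conditions first, then rare ones
--     return [pair[1] for pair in common_pairs] + [pair[1] for pair in rare_pairs]
-- ===== SOURCE B (Python) =====
-- def sort_classes_by_frequency_keywords(unique_labels, class_names):
--     common_conditions = ['cold', 'flu', 'headache', 'fever', 'cough', 'nausea', 'fatigue',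
--                          'diarrhea', 'constipation', 'rash', 'back pain', 'arthritis',
--                          'hypertension', 'diabetes', 'asthma', 'depression', 'anxiety']
--     def sort_key(label):
--         name = class_names[label].lower()
--         group = 0 if any(c in name for c in common_conditions) else 1
--         return (group, name, label)
--     return sorted(unique_labels, key=sort_key)
-- ===== Notes on version B (the rewrite author's own statement) =====
-- stated objective: simpler
-- what changed: Replaces the partition-into-two-lists-then-two-sorts-then-concatenate pipeline by a single sorted() call with a compound key (common-flag, lowercased name, label).
import Mathlib
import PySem

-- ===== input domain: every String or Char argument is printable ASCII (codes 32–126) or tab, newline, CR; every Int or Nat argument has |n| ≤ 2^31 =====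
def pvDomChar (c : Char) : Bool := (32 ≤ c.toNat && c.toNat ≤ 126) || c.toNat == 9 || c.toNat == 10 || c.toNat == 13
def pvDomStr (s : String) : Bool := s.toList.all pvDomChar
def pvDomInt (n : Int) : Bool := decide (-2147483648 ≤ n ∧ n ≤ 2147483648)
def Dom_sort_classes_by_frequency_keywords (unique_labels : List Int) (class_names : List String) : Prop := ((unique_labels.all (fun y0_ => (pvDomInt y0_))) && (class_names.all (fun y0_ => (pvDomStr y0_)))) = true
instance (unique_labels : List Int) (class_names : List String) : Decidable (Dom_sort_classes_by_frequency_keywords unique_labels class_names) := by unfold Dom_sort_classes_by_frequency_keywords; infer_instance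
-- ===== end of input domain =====

-- B replaces A's partition-into-two-lists + two sorts + concatenation by ONE keyed sort
-- with the compound key (common-flag, lowercased name, label); objective: simpler.


-- ===== PORT A =====
-- the module-level constant list of keywords (shared data, used by both ports)
def pvCommonConditions : List String :=
  ["cold", "flu", "headache", "fever", "cough", "nausea", "fatigue",
   "diarrhea", "constipation", "rash", "back pain", "arthritis",
   "hypertension", "diabetes", "asthma", "depression", "anxiety"]

-- A's nested helper is_common_condition: any(common in name.lower() for common in …)
def pvIsCommonCondition (name : String) : Bool :=
  let nameLower := PySem.Str.lower name
  pvCommonConditions.any (fun common => PySem.Str.isIn common nameLower)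

-- A: one loop appending (name.lower(), label) to common_pairs or rare_pairs,
-- then sort each pair list (Python tuple order = sorted2 on (fst, snd)), then map snd and concatenate.
def sort_classes_by_frequency_keywords (unique_labels : List Int) (class_names : List String) : List Int :=
  let pairs := unique_labels.foldl
    (fun (acc : List (String × Int) × List (String × Int)) label =>
      let name := PySem.List.pyGetD class_names label ""
      if pvIsCommonCondition name then (acc.1 ++ [(PySem.Str.lower name, label)], acc.2)
      else (acc.1, acc.2 ++ [(PySem.Str.lower name, label)]))
    ([], [])
  (PySem.List.sorted2 pairs.1 Prod.fst Prod.snd).map Prod.snd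
    ++ (PySem.List.sorted2 pairs.2 Prod.fst Prod.snd).map Prod.snd

-- ===== PORT B =====
-- B's sort_key(label) = (group, name, label): group/name computed once per label
def pvSortKeyParts (class_names : List String) (label : Int) : Int × String :=
  let name := PySem.Str.lower (PySem.List.pyGetD class_names label "")
  let group : Int := if pvCommonConditions.any (fun c => PySem.Str.isIn c name) then 0 else 1
  (group, name)

-- Python's 3-tuple comparison sort_key(a) < sort_key(b), written out component by component
def pvSortKeyLt (class_names : List String) (a b : Int) : Bool :=
  let ka := pvSortKeyParts class_names a
  let kb := pvSortKeyParts class_names b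
  decide (ka.1 < kb.1) ||
    (ka.1 == kb.1 && (decide (ka.2 < kb.2) || (ka.2 == kb.2 && decide (a < b))))

-- B: a single sorted(unique_labels, key=sort_key); PySem.List.sorted IS this stable
-- insertion fold (PySem.List.sorted_eq_foldl_insertBy), with the tuple '<' spelled out above.
def sort_classes_by_frequency_keywords_alt (unique_labels : List Int) (class_names : List String) : List Int :=
  unique_labels.foldl (fun acc x => PySem.List.insertBy (pvSortKeyLt class_names) x acc) []

-- ===== PRECONDITION & SPEC =====
-- Pre_ excludes exactly the inputs where Python A raises IndexError on class_names[label].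
def Pre_sort_classes_by_frequency_keywords (unique_labels : List Int) (class_names : List String) : Prop :=
  ∀ label ∈ unique_labels, PySem.Raise.InRange class_names.length label
instance (unique_labels : List Int) (class_names : List String) : Decidable (Pre_sort_classes_by_frequency_keywords unique_labels class_names) := by unfold Pre_sort_classes_by_frequency_keywords; infer_instance

def pvWitness_sort_classes_by_frequency_keywords : List Int × List String :=
  ([1, 0, -1], ["Flu season", "Ebola"])

def Spec_sort_classes_by_frequency_keywords (unique_labels : List Int) (class_names : List String) (out : List Int) : Prop := out = sort_classes_by_frequency_keywords_alt unique_labels class_names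
instance (unique_labels : List Int) (class_names : List String) (out : List Int) : Decidable (Spec_sort_classes_by_frequency_keywords unique_labels class_names out) := by unfold Spec_sort_classes_by_frequency_keywords; infer_instance

-- ===== CLAIM (what is proved, stated in full; the proofs are below) =====
def Claim_equal_sort_classes_by_frequency_keywords : Prop := ∀ (unique_labels : List Int) (class_names : List String), Dom_sort_classes_by_frequency_keywords unique_labels class_names → Pre_sort_classes_by_frequency_keywords unique_labels class_names → Spec_sort_classes_by_frequency_keywords unique_labels class_names (sort_classes_by_frequency_keywords unique_labels class_names)

-- ===== LEMMAS AND PROOFS =====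

-- proof-side view of B's compound key as a nested lexicographic (Prod.Lex) value
def pvSortKeyB (class_names : List String) (label : Int) : Int ×ₗ (String ×ₗ Int) :=
  toLex ((pvSortKeyParts class_names label).1,
         toLex ((pvSortKeyParts class_names label).2, label))

-- the boolean tuple comparison decodes the nested lexicographic order
theorem pv_lex_lt_decode (ga gb : Int) (na nb : String) (a b : Int) :
    (decide (ga < gb) || (ga == gb && (decide (na < nb) || (na == nb && decide (a < b)))))
      = decide ((toLex (ga, toLex (na, a)) : Int ×ₗ (String ×ₗ Int)) < toLex (gb, toLex (nb, b))) := by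
  apply Bool.eq_iff_iff.mpr
  simp only [Bool.or_eq_true, Bool.and_eq_true, decide_eq_true_eq, beq_iff_eq,
    Prod.Lex.lt_iff, ofLex_toLex]

-- B's fold of insertBy on the boolean tuple-< is sorted with the Prod.Lex key
theorem pv_alt_eq_sorted_lex (ul : List Int) (cn : List String) :
    sort_classes_by_frequency_keywords_alt ul cn
      = PySem.List.sorted ul (pvSortKeyB cn) false := by
  have hfun : pvSortKeyLt cn = (fun a b => decide (pvSortKeyB cn a < pvSortKeyB cn b)) := by
    funext a b
    unfold pvSortKeyLt pvSortKeyB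
    exact pv_lex_lt_decode _ _ _ _ a b
  rw [PySem.List.sorted_eq_foldl_insertBy, ← hfun]
  rfl

-- Python's sort of (String, Int) tuples (sorted2 on fst/snd) is the sort by the lexicographic key.
theorem pv_sorted2_eq_sorted_lex {α κ₁ κ₂ : Type} [LinearOrder κ₁] [LinearOrder κ₂]
    (xs : List α) (k1 : α → κ₁) (k2 : α → κ₂) :
    PySem.List.sorted2 xs k1 k2 false
      = PySem.List.sorted xs (fun a => toLex (k1 a, k2 a)) false := by
  unfold PySem.List.sorted2 PySem.List.sorted
  simp only [Bool.false_eq_true, if_false]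
  congr 1
  funext acc x
  congr 1
  funext a b
  have h : (decide (k1 a < k1 b) || (!decide (k1 b < k1 a) && decide (k2 a < k2 b)))
      = decide ((fun a => toLex (k1 a, k2 a)) a < (fun a => toLex (k1 a, k2 a)) b) := by
    apply Bool.eq_iff_iff.mpr
    simp only [Bool.or_eq_true, Bool.and_eq_true, Bool.not_eq_true', decide_eq_true_eq,
      decide_eq_false_iff_not, not_lt, Prod.Lex.lt_iff]
    constructor
    · rintro (h | ⟨h1, h2⟩)
      · exact Or.inl h
      · rcases eq_or_lt_of_le h1 with he | hl
        · exact Or.inr ⟨he, h2⟩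
        · exact Or.inl hl
    · rintro (h | ⟨h1, h2⟩)
      · exact Or.inl h
      · exact Or.inr ⟨le_of_eq h1, h2⟩
  rw [h]

-- the pair produced by A's loop for a label
def pvPairOf (class_names : List String) (label : Int) : String × Int :=
  (PySem.Str.lower (PySem.List.pyGetD class_names label ""), label)

def pvP (class_names : List String) (label : Int) : Bool :=
  pvIsCommonCondition (PySem.List.pyGetD class_names label "")

-- A's loop computes the filtered-and-mapped common and rare pair lists.
theorem pv_fold_pairs (class_names : List String) :
    ∀ (ul : List Int) (acc : List (String × Int) × List (String × Int)),
      ul.foldl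
        (fun (acc : List (String × Int) × List (String × Int)) label =>
          let name := PySem.List.pyGetD class_names label ""
          if pvIsCommonCondition name then (acc.1 ++ [(PySem.Str.lower name, label)], acc.2)
          else (acc.1, acc.2 ++ [(PySem.Str.lower name, label)])) acc
      = (acc.1 ++ (ul.filter (pvP class_names)).map (pvPairOf class_names),
         acc.2 ++ (ul.filter (fun l => !pvP class_names l)).map (pvPairOf class_names)) := by
  intro ul
  induction ul with
  | nil => intro acc; simp
  | cons l t ih =>
    intro acc
    simp only [List.foldl_cons]
    rw [ih]
    by_cases hp : pvIsCommonCondition (PySem.List.pyGetD class_names l "")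
    · simp [pvP, hp, pvPairOf, List.append_assoc]
    · simp [pvP, hp, pvPairOf, List.append_assoc]

-- membership shape of the pair lists
theorem pv_mem_pairs {class_names : List String} {q : Bool} {ul : List Int} {a : String × Int}
    (ha : a ∈ (ul.filter (fun l => pvP class_names l == q)).map (pvPairOf class_names)) :
    a = pvPairOf class_names a.2 ∧ pvP class_names a.2 = q := by
  rcases List.mem_map.mp ha with ⟨l, hl, rfl⟩
  have := List.of_mem_filter hl
  simp only [beq_iff_eq] at this
  exact ⟨rfl, this⟩

-- the B key of a label whose pair is in a given group
theorem pv_key_of_pair (class_names : List String) (l : Int) :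
    pvSortKeyB class_names l
      = toLex ((if pvP class_names l then (0 : Int) else 1),
               toLex (pvPairOf class_names l)) := by
  simp [pvSortKeyB, pvSortKeyParts, pvP, pvIsCommonCondition, pvPairOf]

-- the B key is injective (its last component is the label itself)
theorem pv_key_injective (class_names : List String) :
    Function.Injective (pvSortKeyB class_names) := by
  intro a b h
  have := congrArg (fun x : Int ×ₗ (String ×ₗ Int) => (ofLex (ofLex x).2).2) h
  simpa [pvSortKeyB] using this

-- ===== VERDICT (by name: the statement is the Claim_ definition above) =====
theorem sort_classes_by_frequency_keywords_spec : Claim_equal_sort_classes_by_frequency_keywords := by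
  intro ul cn _hdom _hpre
  unfold Spec_sort_classes_by_frequency_keywords
  unfold sort_classes_by_frequency_keywords
  rw [pv_alt_eq_sorted_lex, pv_fold_pairs cn ul ([], [])]
  simp only [List.nil_append]
  rw [pv_sorted2_eq_sorted_lex, pv_sorted2_eq_sorted_lex]
  set pk : String × Int → String ×ₗ Int := fun a => toLex (a.1, a.2) with hpk
  set C := (ul.filter (pvP cn)).map (pvPairOf cn) with hC
  set R := (ul.filter (fun l => !pvP cn l)).map (pvPairOf cn) with hR
  -- both sides are permutations of ul, Pairwise under the injective B key; hence equal
  apply PySem.List.eq_of_perm_of_pairwise_le_of_injective (pvSortKeyB cn) (pv_key_injective cn)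
  · -- permutation
    refine List.Perm.trans ?_ (PySem.List.sorted_perm ul (pvSortKeyB cn) false).symm
    have p1 : ((PySem.List.sorted C pk false).map Prod.snd).Perm (ul.filter (pvP cn)) := by
      refine List.Perm.trans ((PySem.List.sorted_perm C pk false).map Prod.snd) ?_
      rw [hC, List.map_map]
      have : (Prod.snd ∘ pvPairOf cn) = id := by funext l; rfl
      simp [this]
    have p2 : ((PySem.List.sorted R pk false).map Prod.snd).Perm (ul.filter (fun l => !pvP cn l)) := by
      refine List.Perm.trans ((PySem.List.sorted_perm R pk false).map Prod.snd) ?_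
      rw [hR, List.map_map]
      have : (Prod.snd ∘ pvPairOf cn) = id := by funext l; rfl
      simp [this]
    exact List.Perm.trans (List.Perm.append p1 p2) (List.filter_append_perm _ ul)
  · -- Pairwise on A's output
    rw [List.pairwise_append]
    refine ⟨?_, ?_, ?_⟩
    · -- inside the common block
      rw [List.pairwise_map]
      refine (PySem.List.sorted_pairwise C pk).imp_of_mem ?_
      intro a b ha hb hab
      have ha' := pv_mem_pairs (q := true) (by simpa [hC] using ((PySem.List.mem_sorted _ _ _ _).mp ha))
      have hb' := pv_mem_pairs (q := true) (by simpa [hC] using ((PySem.List.mem_sorted _ _ _ _).mp hb))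
      rw [pv_key_of_pair, pv_key_of_pair, ha'.2, hb'.2]
      simp only [if_pos]
      rw [Prod.Lex.le_iff]
      refine Or.inr ⟨rfl, ?_⟩
      rw [← ha'.1, ← hb'.1]
      exact hab
    · -- inside the rare block
      rw [List.pairwise_map]
      refine (PySem.List.sorted_pairwise R pk).imp_of_mem ?_
      intro a b ha hb hab
      have ha' := pv_mem_pairs (q := false)
        (by simpa [hR, Bool.not_eq_true'] using ((PySem.List.mem_sorted _ _ _ _).mp ha))
      have hb' := pv_mem_pairs (q := false)
        (by simpa [hR, Bool.not_eq_true'] using ((PySem.List.mem_sorted _ _ _ _).mp hb))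
      rw [pv_key_of_pair, pv_key_of_pair, ha'.2, hb'.2]
      simp only [Bool.false_eq_true, if_false]
      rw [Prod.Lex.le_iff]
      refine Or.inr ⟨rfl, ?_⟩
      rw [← ha'.1, ← hb'.1]
      exact hab
    · -- every common label precedes every rare label: 0 < 1 on the first key component
      intro x hx y hy
      rcases List.mem_map.mp hx with ⟨a, ha, rfl⟩
      rcases List.mem_map.mp hy with ⟨b, hb, rfl⟩
      have ha' := pv_mem_pairs (q := true) (by simpa [hC] using ((PySem.List.mem_sorted _ _ _ _).mp ha))
      have hb' := pv_mem_pairs (q := false)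
        (by simpa [hR, Bool.not_eq_true'] using ((PySem.List.mem_sorted _ _ _ _).mp hb))
      rw [pv_key_of_pair, pv_key_of_pair, ha'.2, hb'.2]
      rw [Prod.Lex.le_iff]
      exact Or.inl (by norm_num)
  · -- Pairwise on B's output
    exact PySem.List.sorted_pairwise ul (pvSortKeyB cn)
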